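-- pv_equiv track=rewrite | github.com/Scepticae/My-Coding-Projects | My Python Coding/My Daily Coding/reverseInterleave.py | reverseInterleave
-- ===== SOURCE A (Python) =====
-- from math import ceil
--
-- def reverseInterleave(n_array):
--   n_queue = []
--
--   # Populate the Queue
--   for index in range(int(ceil(len(n_array)/2))):
--     n_queue.append(n_array[index])
--     n_queue.append(n_array[(len(n_array)-1)-index])
--
--   # Dequeue items back in the array
--   for index in range(len(n_array)):
--     n_array[index] = n_queue.pop(0)
--
--   return n_array
-- ===== SOURCE B (Python) =====
-- def reverseInterleave(n_array):
--     n = len(n_array)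
--     c = (n + 1) // 2
--     h = n // 2
--     front = n_array[:c]
--     back = n_array[h:][::-1]
--     flat = [x for pair in zip(front, back) for x in pair]
--     n_array[:] = flat[:n]
--     return n_array
-- ===== Notes on version B (the rewrite author's own statement) =====
-- stated objective: simpler
-- what changed: Replaces the index-driven queue build and the O(n^2) pop(0) write-back loop with slicing: zip the front half with the reversed back half, flatten, truncate to n and slice-assign in place.
import Mathlib
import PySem

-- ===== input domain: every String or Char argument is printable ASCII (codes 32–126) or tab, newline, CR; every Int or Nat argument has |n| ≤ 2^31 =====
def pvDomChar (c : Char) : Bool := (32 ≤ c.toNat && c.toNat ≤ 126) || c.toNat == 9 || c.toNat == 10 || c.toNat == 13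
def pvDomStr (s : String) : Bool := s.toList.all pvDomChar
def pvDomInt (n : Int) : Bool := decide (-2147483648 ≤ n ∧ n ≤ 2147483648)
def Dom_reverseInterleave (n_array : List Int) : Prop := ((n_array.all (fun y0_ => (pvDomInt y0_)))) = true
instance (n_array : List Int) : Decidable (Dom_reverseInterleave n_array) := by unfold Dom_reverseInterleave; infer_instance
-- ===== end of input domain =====

-- B replaces the queue-and-pop(0) loops by a zip/flatten of the two halves (simpler, one
-- pass); A mutates n_array in place and B performs the same slice-assignment mutation —
-- the theorems below are about the returned value.

-- ===== PORT A =====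
-- int(ceil(len/2)) is exact as (len+1)/2 on Nat for lengths in range.
-- n_array[index] and the pop(0) are always in range here, so getD/headD defaults are never used.
def reverseInterleave (n_array : List Int) : List Int :=
  let n_queue : List Int :=
    (List.range ((n_array.length + 1) / 2)).foldl
      (fun q index => q ++ [n_array.getD index 0] ++ [n_array.getD (n_array.length - 1 - index) 0]) []
  let st :=
    (List.range n_array.length).foldl
      (fun (st : List Int × List Int) index => (st.1.set index (st.2.headD 0), st.2.tail))
      (n_array, n_queue)
  st.1

-- ===== PORT B =====
def reverseInterleave_alt (n_array : List Int) : List Int :=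
  let n := n_array.length
  let c := (n + 1) / 2
  let h := n / 2
  let front := n_array.take c
  let back := (n_array.drop h).reverse
  (((front.zip back).flatMap (fun p => [p.1, p.2])).take n)

-- ===== PRECONDITION & SPEC =====
def Spec_reverseInterleave (n_array : List Int) (out : List Int) : Prop := out = reverseInterleave_alt n_array
instance (n_array : List Int) (out : List Int) : Decidable (Spec_reverseInterleave n_array out) := by unfold Spec_reverseInterleave; infer_instance

-- ===== CLAIM (what is proved, stated in full; the proofs are below) =====
def Claim_equal_reverseInterleave : Prop := ∀ (n_array : List Int), Dom_reverseInterleave n_array → Spec_reverseInterleave n_array (reverseInterleave n_array)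

-- ===== LEMMAS AND PROOFS =====

-- A's queue loop unrolled to a flatMap over the index range.
theorem queue_eq_flatMap (a : List Int) (c : Nat) :
    (List.range c).foldl
      (fun q index => q ++ [a.getD index 0] ++ [a.getD (a.length - 1 - index) 0]) [] =
    (List.range c).flatMap (fun index => [a.getD index 0, a.getD (a.length - 1 - index) 0]) := by
  induction c with
  | zero => simp
  | succ k ih =>
    rw [List.range_succ, List.foldl_append, ih, List.flatMap_append]
    simp

-- A's write-back loop: after k steps the array is q.take k ++ arr.drop k and the queue q.drop k.
theorem writeback_loop (arr q : List Int) (k : Nat) (hk : k ≤ arr.length) (hq : k ≤ q.length) :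
    (List.range k).foldl
      (fun (st : List Int × List Int) index => (st.1.set index (st.2.headD 0), st.2.tail))
      (arr, q) = (q.take k ++ arr.drop k, q.drop k) := by
  induction k with
  | zero => simp
  | succ m ih =>
    have hm1 : m ≤ arr.length := by omega
    have hm2 : m ≤ q.length := by omega
    rw [List.range_succ, List.foldl_append, ih hm1 hm2]
    have hdq : q.drop m = q[m]'(by omega) :: q.drop (m + 1) :=
      List.drop_eq_getElem_cons (by omega)
    have hda : arr.drop m = arr[m]'(by omega) :: arr.drop (m + 1) :=
      List.drop_eq_getElem_cons (by omega)
    simp only [List.foldl_cons, List.foldl_nil]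
    refine Prod.ext ?_ ?_
    · show (q.take m ++ arr.drop m).set m ((q.drop m).headD 0) = q.take (m+1) ++ arr.drop (m+1)
      rw [hdq, hda]
      have hlen : (q.take m).length = m := by simp [hm2]
      rw [List.set_append_right _ _ (by omega), hlen, Nat.sub_self, List.headD_cons,
         List.set_cons_zero, List.take_succ_eq_append_getElem (by omega : m < q.length),
         List.append_assoc, List.singleton_append]
    · show (q.drop m).tail = q.drop (m + 1)
      simp [List.tail_drop]

-- B's zip as a map over the index range.
theorem zip_halves_eq (a : List Int) :
    (a.take ((a.length + 1) / 2)).zip ((a.drop (a.length / 2)).reverse) =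
    (List.range ((a.length + 1) / 2)).map
      (fun index => (a.getD index 0, a.getD (a.length - 1 - index) 0)) := by
  apply List.ext_getElem
  · simp; omega
  · intro i h1 h2
    have hic : i < (a.length + 1) / 2 := by simp at h2; omega
    have hin : i < a.length := by omega
    rw [List.getElem_zip]
    simp only [List.getElem_map, List.getElem_range]
    refine Prod.ext ?_ ?_
    · simp [List.getElem_take, List.getD_eq_getElem?_getD, List.getElem?_eq_getElem hin]
    · show ((a.drop (a.length / 2)).reverse)[i]'(by simp; omega) = a.getD (a.length - 1 - i) 0
      rw [List.getElem_reverse, List.getElem_drop]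
      have hj : a.length - 1 - i < a.length := by omega
      rw [List.getD_eq_getElem?_getD, List.getElem?_eq_getElem hj, Option.getD_some]
      congr 1
      simp
      omega

-- ===== VERDICT (by name: the statement is the Claim_ definition above) =====
theorem reverseInterleave_spec : Claim_equal_reverseInterleave := by
  intro a _
  show reverseInterleave a = reverseInterleave_alt a
  unfold reverseInterleave reverseInterleave_alt
  simp only
  rw [queue_eq_flatMap, zip_halves_eq]
  set n := a.length with hn
  set c := (n + 1) / 2 with hc
  set q := (List.range c).flatMap (fun index => [a.getD index 0, a.getD (n - 1 - index) 0]) with hq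
  have hql : q.length = 2 * c := by rw [hq]; simp; omega
  have hnq : n ≤ q.length := by rw [hql]; omega
  rw [writeback_loop a q n (by omega) hnq]
  have hdrop : a.drop n = [] := by simp [hn]
  rw [hdrop, List.append_nil, hq, List.flatMap_map]
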